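-- pv_equiv track=rewrite | github.com/matanich05/Programiranje1 | seminarska_naloga/1. del/zagovor/hidden.py | check
-- ===== SOURCE A (Python) =====
-- def check(geslo, dolzina_geslo, sporocilo, dolzina_sporoc):
--     # Indeksi za spremljanje pozicije v geslu in sporočilu
--     index_sporoc = 0
--     index_geslo = 0
--     # Rezultat (-1 pomeni, da še iščemo)
--     rez = -1
--
--     while rez < 0:
--         # Če smo prišli do konca sporočila, geslo ni najdeno
--         if index_sporoc == dolzina_sporoc:
--             rez = 0
--         # Če se znak v sporočilu ujema z znakom v geslu
--         elif sporocilo[index_sporoc] == geslo[index_geslo]: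
--             index_geslo += 1  # Premaknemo se na naslednji znak v geslu
--             # Če smo preverili celo geslo, je bilo najdeno
--             if index_geslo == dolzina_geslo:
--                 rez = 1
--         else:
--             # Preverimo, ali se kateri od naslednjih znakov gesla ujema s trenutnim znakom sporočila
--             for i in range(index_geslo + 1, dolzina_geslo):
--                 if geslo[i] == sporocilo[index_sporoc]:
--                     rez = 0  # Geslo ni pravilno
--                     break
--         # Premaknemo se na naslednji znak v sporočilu
--         index_sporoc += 1
--     return rez
-- ===== SOURCE B (Python) =====
-- def check(geslo, dolzina_geslo, sporocilo, dolzina_sporoc):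
--     # One pass over the declared message prefix with a running frequency table
--     # of the not-yet-reached password characters: an O(1) dictionary lookup
--     # replaces A's inner scan over the password suffix at every mismatch.
--     pending = geslo[:dolzina_geslo]
--     remaining = {}
--     for c in pending[1:]:
--         remaining[c] = remaining.get(c, 0) + 1
--     j = 0
--     for i in range(dolzina_sporoc):
--         c = sporocilo[i]
--         if j < len(pending) and c == pending[j]:
--             j += 1
--             if j == len(pending):
--                 return 1
--             remaining[pending[j]] = remaining.get(pending[j], 0) - 1
--         elif remaining.get(c, 0) > 0:
--             return 0
--     return 0
-- ===== Notes on version B (the rewrite author's own statement) =====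
-- stated objective: alternative
-- what changed: Replaces A's inner rescans of the remaining password suffix at every mismatching message character by a frequency dictionary of the not-yet-reached password characters maintained in O(1) per step, turning the worst case O(n*m) scan-in-a-loop into a single O(n+m) pass (not measurably faster on the generated workloads, where A returns early).
-- outside the precondition, e.g. on check('ab', 5, 'ab', 2): A returns 0, B returns 1; on check('a', 1, 'a', -1): A returns 1, B returns 0; on check('ab', -1, 'a', 1): A returns 0, B returns 1
import Mathlib
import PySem

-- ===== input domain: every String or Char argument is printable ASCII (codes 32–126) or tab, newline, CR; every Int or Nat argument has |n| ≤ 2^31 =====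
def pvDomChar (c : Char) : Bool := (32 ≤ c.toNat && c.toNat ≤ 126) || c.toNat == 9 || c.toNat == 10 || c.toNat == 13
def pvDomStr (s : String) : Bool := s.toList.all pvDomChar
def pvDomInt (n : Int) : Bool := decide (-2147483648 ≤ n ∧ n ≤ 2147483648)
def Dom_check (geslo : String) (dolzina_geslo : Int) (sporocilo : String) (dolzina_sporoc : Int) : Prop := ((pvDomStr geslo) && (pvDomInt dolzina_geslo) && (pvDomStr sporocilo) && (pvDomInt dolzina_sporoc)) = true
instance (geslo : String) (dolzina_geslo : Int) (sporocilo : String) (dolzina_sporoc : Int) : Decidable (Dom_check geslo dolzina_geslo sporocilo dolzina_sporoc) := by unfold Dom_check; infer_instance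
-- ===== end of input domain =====

-- B replaces A's inner scan over the password suffix at a mismatch by a running
-- frequency dictionary of the not-yet-reached password characters (objective:
-- alternative single-pass algorithm; not measured as faster).

-- ===== PORT A =====
-- inner 'for i in range(index_geslo + 1, dolzina_geslo): if geslo[i] == sporocilo[index_sporoc]: …'
-- (none = IndexError from geslo[i])
def checkInner (g : List Char) (c : Char) : List Int → Option Bool
  | [] => some false
  | i :: rest =>
    match PySem.List.pyGet? g i with
    | none => none
    | some ch => if ch == c then some true else checkInner g c rest

-- the 'while rez < 0' loop; fuel bounds the iterations, none = IndexError / fuel exhausted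
def checkLoop (g s : List Char) (dg ds : Int) (iS iG : Int) : Nat → Option Int
  | 0 => none
  | fuel + 1 =>
    if iS = ds then some 0
    else
      match PySem.List.pyGet? s iS, PySem.List.pyGet? g iG with
      | some cs, some cg =>
        if cs == cg then
          if iG + 1 = dg then some 1
          else checkLoop g s dg ds (iS + 1) (iG + 1) fuel
        else
          match checkInner g cs (PySem.List.pyRange (iG + 1) dg 1) with
          | none => none
          | some true => some 0
          | some false => checkLoop g s dg ds (iS + 1) iG fuel
      | _, _ => none

def check (geslo : String) (dolzina_geslo : Int) (sporocilo : String) (dolzina_sporoc : Int) : Int :=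
  (checkLoop geslo.toList sporocilo.toList dolzina_geslo dolzina_sporoc 0 0
    (dolzina_sporoc.toNat + 1)).getD 0

-- ===== PORT B =====
-- 'for i in range(dolzina_sporoc): c = sporocilo[i]; …' over the range list;
-- pending = the password prefix, j = index of its next unmatched character,
-- remaining = frequency dictionary of pending[j+1:] (none = IndexError)
def checkAltLoop (pending : List Char) (remaining : PySem.Dict Char Int)
    (s : List Char) (j : Int) : List Int → Option Int
  | [] => some 0
  | i :: rest =>
    match PySem.List.pyGet? s i with
    | none => none
    | some c =>
      if j < (pending.length : Int) then
        match PySem.List.pyGet? pending j with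
        | none => none
        | some p =>
          if c == p then
            if j + 1 = (pending.length : Int) then some 1
            else
              match PySem.List.pyGet? pending (j + 1) with
              | none => none
              | some q =>
                checkAltLoop pending (remaining.insert q (remaining.getD q 0 - 1)) s (j + 1) rest
          else if remaining.getD c 0 > 0 then some 0
          else checkAltLoop pending remaining s j rest
      else if remaining.getD c 0 > 0 then some 0
      else checkAltLoop pending remaining s j rest

def check_alt (geslo : String) (dolzina_geslo : Int) (sporocilo : String) (dolzina_sporoc : Int) : Int :=
  let pending := PySem.List.slice geslo.toList none (some dolzina_geslo)
  let remaining := (PySem.List.slice pending (some 1) none).foldl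
    (fun d c => d.insert c (d.getD c 0 + 1)) PySem.Dict.empty
  (checkAltLoop pending remaining sporocilo.toList 0
    (PySem.List.pyRange 0 dolzina_sporoc 1)).getD 0

-- ===== PRECONDITION & SPEC =====
-- Pre_ excludes declared lengths inconsistent with the argument strings, on which A
-- raises IndexError or — where it still returns — its value reflects reading past the
-- declared prefix and is an accident of the inconsistent call; it keeps the consistent
-- calls plus the safe degenerate corners (an empty message prefix; an empty effective
-- password with a message prefix A cannot run off; a first message character that
-- decides the answer before any length is overrun).
def Pre_check (geslo : String) (dolzina_geslo : Int) (sporocilo : String) (dolzina_sporoc : Int) : Prop :=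
  (0 ≤ dolzina_sporoc ∧ dolzina_sporoc ≤ sporocilo.toList.length ∧
    ((1 ≤ dolzina_geslo ∧ dolzina_geslo ≤ geslo.toList.length) ∨
      dolzina_sporoc = 0 ∨
      ((dolzina_geslo = 0 ∨ dolzina_geslo + geslo.toList.length ≤ 0) ∧
        dolzina_sporoc ≤ geslo.toList.length) ∨
      (dolzina_geslo ≤ 0 ∧ geslo.toList ≠ [] ∧
        geslo.toList.headI ∉ sporocilo.toList.take dolzina_sporoc.toNat))) ∨
  (dolzina_geslo = 1 ∧ geslo.toList ≠ [] ∧ sporocilo.toList ≠ [] ∧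
    1 ≤ dolzina_sporoc ∧ sporocilo.toList.headI = geslo.toList.headI) ∨
  (geslo.toList ≠ [] ∧ sporocilo.toList ≠ [] ∧ dolzina_sporoc ≠ 0 ∧
    sporocilo.toList.headI ≠ geslo.toList.headI ∧
    sporocilo.toList.headI ∈ (geslo.toList.take dolzina_geslo.toNat).drop 1)
instance (geslo : String) (dolzina_geslo : Int) (sporocilo : String) (dolzina_sporoc : Int) : Decidable (Pre_check geslo dolzina_geslo sporocilo dolzina_sporoc) := by unfold Pre_check; infer_instance

def pvWitness_check : String × Int × String × Int := ("ab", 2, "xaxb", 4)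

def Spec_check (geslo : String) (dolzina_geslo : Int) (sporocilo : String) (dolzina_sporoc : Int) (out : Int) : Prop := out = check_alt geslo dolzina_geslo sporocilo dolzina_sporoc
instance (geslo : String) (dolzina_geslo : Int) (sporocilo : String) (dolzina_sporoc : Int) (out : Int) : Decidable (Spec_check geslo dolzina_geslo sporocilo dolzina_sporoc out) := by unfold Spec_check; infer_instance

-- ===== CLAIM (what is proved, stated in full; the proofs are below) =====
def Claim_equal_check : Prop := ∀ (geslo : String) (dolzina_geslo : Int) (sporocilo : String) (dolzina_sporoc : Int), Dom_check geslo dolzina_geslo sporocilo dolzina_sporoc → Pre_check geslo dolzina_geslo sporocilo dolzina_sporoc → Spec_check geslo dolzina_geslo sporocilo dolzina_sporoc (check geslo dolzina_geslo sporocilo dolzina_sporoc)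

-- ===== LEMMAS AND PROOFS =====

theorem checkInner_range (g : List Char) (c : Char) (b : Int) (hb : b ≤ g.length) :
    ∀ (n : Nat) (a : Int), 0 ≤ a → (b - a).toNat = n →
    checkInner g c (PySem.List.pyRange a b 1)
      = some (decide (c ∈ (g.take b.toNat).drop a.toNat)) := by
  intro n
  induction n with
  | zero =>
    intro a ha hn
    rw [PySem.List.pyRange_one_eq_nil (by omega)]
    have hlen : ((g.take b.toNat).drop a.toNat) = [] := by
      apply List.drop_eq_nil_of_le
      simp [List.length_take]
      omega
    simp [checkInner, hlen]
  | succ n ih =>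
    intro a ha hn
    have hab : a < b := by omega
    rw [PySem.List.pyRange_one_cons hab]
    have halen : a.toNat < g.length := by omega
    have hget : PySem.List.pyGet? g a = some g[a.toNat] :=
      PySem.List.pyGet?_eq_some_getElem g ha (by omega)
    have hdrop : (g.take b.toNat).drop a.toNat = g[a.toNat] :: (g.take b.toNat).drop (a.toNat + 1) := by
      rw [List.drop_eq_getElem_cons (by simp [List.length_take]; omega)]
      congr 1
      rw [List.getElem_take]
    simp only [checkInner, hget]
    by_cases hc : g[a.toNat] = c
    · simp [hc, hdrop]
    · have : (g[a.toNat] == c) = false := by simp [hc]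
      rw [this]
      simp only [if_false, Bool.false_eq_true]
      rw [ih (a + 1) (by omega) (by omega)]
      rw [hdrop]
      have : a.toNat + 1 = (a + 1).toNat := by omega
      simp [List.mem_cons, Ne.symm hc, this]

theorem checkInner_finds (g : List Char) (c : Char) (b : Int) :
    ∀ (n : Nat) (a : Int), 0 ≤ a → (b - a).toNat = n →
    c ∈ (g.take b.toNat).drop a.toNat →
    checkInner g c (PySem.List.pyRange a b 1) = some true := by
  intro n
  induction n with
  | zero =>
    intro a ha hn hmem
    have : (g.take b.toNat).drop a.toNat = [] := by
      apply List.drop_eq_nil_of_le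
      simp [List.length_take]
      omega
    rw [this] at hmem
    cases hmem
  | succ n ih =>
    intro a ha hn hmem
    have hlt : a.toNat < (g.take b.toNat).length := by
      by_contra hcon
      rw [List.drop_eq_nil_of_le (by omega)] at hmem
      cases hmem
    have hbound : a.toNat < b.toNat ∧ a.toNat < g.length := by
      simp [List.length_take] at hlt
      omega
    have hab : a < b := by omega
    rw [PySem.List.pyRange_one_cons hab]
    have hget : PySem.List.pyGet? g a = some g[a.toNat] :=
      PySem.List.pyGet?_eq_some_getElem g ha (by omega)
    have hdrop : (g.take b.toNat).drop a.toNat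
        = g[a.toNat] :: (g.take b.toNat).drop (a.toNat + 1) := by
      rw [List.drop_eq_getElem_cons hlt]
      congr 1
      rw [List.getElem_take]
    simp only [checkInner, hget]
    by_cases hc : g[a.toNat] = c
    · simp [hc]
    · have hne : (g[a.toNat] == c) = false := by simp [hc]
      rw [hne]
      simp only [if_false, Bool.false_eq_true]
      rw [hdrop, List.mem_cons] at hmem
      rcases hmem with hmem | hmem
      · exact absurd hmem.symm hc
      · exact ih (a + 1) (by omega) (by omega)
          (by rwa [show (a + 1).toNat = a.toNat + 1 by omega])

theorem slice_to_take (g : List Char) (dg : Int) :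
    ∃ m : Nat, PySem.List.slice g none (some dg) = g.take m := by
  by_cases hz : 0 ≤ dg
  · exact ⟨dg.toNat, PySem.List.slice_to _ hz⟩
  · set k := (-dg).toNat with hk
    have h2 : PySem.List.slice g none (some dg) = g.take (g.length - k) := by
      rw [show dg = -((k : Nat) : Int) by omega]
      exact PySem.List.slice_to_neg_natCast g k (by omega)
    exact ⟨_, h2⟩

-- B's message loop returns 0 whenever no message character of the declared prefix
-- can match the head of `pending` (also covering an empty `pending`; j stays 0)
theorem altLoop_no_head_match (s : List Char) (ds : Int) (pending : List Char)
    (rem : PySem.Dict Char Int)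
    (h : ∀ c ∈ s.take ds.toNat, pending.head? ≠ some c) (hs : ds ≤ s.length) :
    ∀ (n : Nat) (a : Int), 0 ≤ a → (ds - a).toNat = n →
    checkAltLoop pending rem s 0 (PySem.List.pyRange a ds 1) = some 0 := by
  intro n
  induction n with
  | zero =>
    intro a ha hn
    rw [PySem.List.pyRange_one_eq_nil (by omega)]
    rfl
  | succ n ih =>
    intro a ha hn
    have hab : a < ds := by omega
    rw [PySem.List.pyRange_one_cons hab]
    have hget : PySem.List.pyGet? s a = some s[a.toNat] :=
      PySem.List.pyGet?_eq_some_getElem s ha (by omega)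
    have hmem : s[a.toNat] ∈ s.take ds.toNat := by
      have hlt : a.toNat < (s.take ds.toNat).length := by
        simp [List.length_take]; omega
      have := List.getElem_mem hlt
      rwa [List.getElem_take] at this
    have hrec := ih (a + 1) (by omega) (by omega)
    match hp : pending with
    | [] =>
      simp only [checkAltLoop, hget, List.length_nil, Nat.cast_zero, lt_irrefl, if_false]
      split_ifs with hd
      · rfl
      · exact hrec
    | p :: ptail =>
      have hpc : (s[a.toNat] == p) = false := by
        have h1 := h s[a.toNat] hmem
        simp only [List.head?_cons, ne_eq, Option.some.injEq] at h1
        exact beq_eq_false_iff_ne.mpr (fun hh => h1 hh.symm)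
      have hget0 : PySem.List.pyGet? (p :: ptail) 0 = some p :=
        PySem.List.pyGet?_zero_cons p ptail
      have hguard : (0 : Int) < ((p :: ptail).length : Int) := by
        simp
      simp only [checkAltLoop, hget, if_pos hguard, hget0, hpc, Bool.false_eq_true,
        if_false]
      split_ifs with hd
      · rfl
      · exact hrec

theorem checkLoop_nonpos_dg (g s : List Char) (dg ds : Int)
    (hdg : dg ≤ 0) (hg : ds ≤ g.length) (hs : ds ≤ s.length) :
    ∀ (fuel : Nat) (iS iG : Int), 0 ≤ iS → iS ≤ ds → 0 ≤ iG → iG ≤ iS →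
      (ds - iS).toNat < fuel →
      checkLoop g s dg ds iS iG fuel = some 0 := by
  intro fuel
  induction fuel with
  | zero => intro iS iG h0 h1 h2 h3 h4; omega
  | succ fuel ih =>
    intro iS iG h0 h1 h2 h3 h4
    by_cases hEnd : iS = ds
    · simp [checkLoop, hEnd]
    · have hgets : PySem.List.pyGet? s iS = some s[iS.toNat] :=
        PySem.List.pyGet?_eq_some_getElem s h0 (by omega)
      have hgetg : PySem.List.pyGet? g iG = some g[iG.toNat] :=
        PySem.List.pyGet?_eq_some_getElem g h2 (by omega)
      have hr : PySem.List.pyRange (iG + 1) dg 1 = [] :=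
        PySem.List.pyRange_one_eq_nil (by omega)
      have hDone : ¬ iG + 1 = dg := by omega
      by_cases hmatch : s[iS.toNat] = g[iG.toNat]
      · simp only [checkLoop, if_neg hEnd, hgets, hgetg, hmatch, BEq.rfl, if_pos,
          if_neg hDone]
        exact ih (iS + 1) (iG + 1) (by omega) (by omega) (by omega) (by omega) (by omega)
      · have hne : (s[iS.toNat] == g[iG.toNat]) = false := by simp [hmatch]
        simp only [checkLoop, if_neg hEnd, hgets, hgetg, hne, Bool.false_eq_true,
          if_false, hr, checkInner]
        exact ih (iS + 1) iG (by omega) (by omega) h2 (by omega) (by omega)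

theorem checkLoop_head_absent (g s : List Char) (dg ds : Int)
    (hdg : dg ≤ 0) (hgne : g ≠ [])
    (hno : g.headI ∉ s.take ds.toNat) (hs : ds ≤ s.length) :
    ∀ (fuel : Nat) (iS : Int), 0 ≤ iS → iS ≤ ds → (ds - iS).toNat < fuel →
      checkLoop g s dg ds iS 0 fuel = some 0 := by
  intro fuel
  induction fuel with
  | zero => intro iS h0 h1 h2; omega
  | succ fuel ih =>
    intro iS h0 h1 h2
    by_cases hEnd : iS = ds
    · simp [checkLoop, hEnd]
    · have hgets : PySem.List.pyGet? s iS = some s[iS.toNat] :=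
        PySem.List.pyGet?_eq_some_getElem s h0 (by omega)
      have hgetg : PySem.List.pyGet? g 0 = some g.headI := by
        cases g with
        | nil => exact absurd rfl hgne
        | cons a t => simp
      have hmem : s[iS.toNat] ∈ s.take ds.toNat := by
        have hlt : iS.toNat < (s.take ds.toNat).length := by
          simp [List.length_take]; omega
        have := List.getElem_mem hlt
        rwa [List.getElem_take] at this
      have hne : (s[iS.toNat] == g.headI) = false := by
        simp only [beq_eq_false_iff_ne, ne_eq]
        intro hh
        exact hno (hh ▸ hmem)
      have hr : PySem.List.pyRange (0 + 1) dg 1 = [] :=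
        PySem.List.pyRange_one_eq_nil (by omega)
      simp only [checkLoop, if_neg hEnd, hgets, hgetg, hne, Bool.false_eq_true,
        if_false, hr, checkInner]
      exact ih (iS + 1) (by omega) (by omega) (by omega)

-- the main loop invariant: A's position pair (iS, iG) corresponds to B's index j
-- into `pending` and its frequency dictionary `remaining`
theorem checkLoop_eq_alt (g s : List Char) (dg ds : Int)
    (hdg1 : 1 ≤ dg) (hdg2 : dg ≤ g.length) (hds2 : ds ≤ s.length) :
    ∀ (fuel : Nat) (iS iG : Int) (remaining : PySem.Dict Char Int),
      0 ≤ iS → iS ≤ ds → 0 ≤ iG → iG < dg → (ds - iS).toNat < fuel →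
      (∀ c, remaining.getD c 0 = ((g.take dg.toNat).drop (iG.toNat + 1)).count c) →
      checkLoop g s dg ds iS iG fuel
        = checkAltLoop (g.take dg.toNat) remaining s iG
            (PySem.List.pyRange iS ds 1) := by
  intro fuel
  induction fuel with
  | zero => intro iS iG remaining h0 h1 h2 h3 h4 h5; omega
  | succ fuel ih =>
    intro iS iG remaining h0 h1 h2 h3 h4 hinv
    have hlenP : (((g.take dg.toNat).length : Nat) : Int) = dg := by
      rw [List.length_take]
      omega
    by_cases hEnd : iS = ds
    · rw [PySem.List.pyRange_one_eq_nil (by omega)]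
      simp [checkLoop, hEnd, checkAltLoop]
    · have hiSlt : iS < ds := by omega
      rw [PySem.List.pyRange_one_cons (by omega)]
      have hsl : iS.toNat < s.length := by omega
      have hgl : iG.toNat < g.length := by omega
      have hgets : PySem.List.pyGet? s iS = some s[iS.toNat] :=
        PySem.List.pyGet?_eq_some_getElem s h0 (by omega)
      have hgetg : PySem.List.pyGet? g iG = some g[iG.toNat] :=
        PySem.List.pyGet?_eq_some_getElem g h2 (by omega)
      have hguard : iG < (((g.take dg.toNat).length : Nat) : Int) := by omega
      have hgetp : PySem.List.pyGet? (g.take dg.toNat) iG = some g[iG.toNat] := by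
        rw [PySem.List.pyGet?_eq_some_getElem (g.take dg.toNat) h2 (by omega)]
        congr 1
        exact List.getElem_take
      set cs := s[iS.toNat] with hcs
      set cg := g[iG.toNat] with hcg
      by_cases hmatch : cs = cg
      · -- matching character
        by_cases hDone : iG + 1 = dg
        · -- the whole password prefix was matched
          have hDone' : iG + 1 = (((g.take dg.toNat).length : Nat) : Int) := by omega
          simp only [checkLoop, if_neg hEnd, hgets, hgetg, hmatch, BEq.rfl, if_pos,
            if_pos hDone, checkAltLoop, if_pos hguard, hgetp, if_pos hDone']
        · -- advance in the password
          have hlt : iG + 1 < dg := by omega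
          have hq : (g.take dg.toNat).drop (iG.toNat + 1)
              = g[iG.toNat + 1] :: (g.take dg.toNat).drop (iG.toNat + 2) := by
            rw [List.drop_eq_getElem_cons (by simp [List.length_take]; omega)]
            congr 1
            rw [List.getElem_take]
          set q := g[iG.toNat + 1] with hqdef
          have hidx : (iG + 1).toNat = iG.toNat + 1 := by omega
          have hgetq : PySem.List.pyGet? (g.take dg.toNat) (iG + 1) = some q := by
            rw [PySem.List.pyGet?_eq_some_getElem (g.take dg.toNat) (by omega) (by omega)]
            congr 1
            simp only [hidx, List.getElem_take]
            exact hqdef.symm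
          have hrec := ih (iS + 1) (iG + 1) (remaining.insert q (remaining.getD q 0 - 1))
            (by omega) (by omega) (by omega) (by omega) (by omega) ?_
          · have hDone' : ¬ iG + 1 = (((g.take dg.toNat).length : Nat) : Int) := by omega
            simp only [checkLoop, if_neg hEnd, hgets, hgetg, hmatch, BEq.rfl, if_pos,
              if_neg hDone]
            rw [hrec]
            simp only [checkAltLoop, hgets, if_pos hguard, hgetp,
              if_neg hDone', hgetq]
            simp [hmatch]
          · -- the frequency dictionary still counts the password suffix
            intro c
            have hcast1 : (iG + 1).toNat = iG.toNat + 1 := by omega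
            by_cases hcq : c = q
            · rw [hcq, PySem.Dict.getD_insert_self, hinv q, hq, hcast1]
              push_cast [List.count_cons]
              simp
            · rw [PySem.Dict.getD_insert_of_ne _ _ _ hcq, hinv c, hq, hcast1]
              simp [Ne.symm hcq]
      · -- mismatch: inner scan vs dictionary lookup
        have hinner := checkInner_range g cs dg (by omega) (dg - (iG + 1)).toNat (iG + 1)
          (by omega) rfl
        have hcast1 : (iG + 1).toNat = iG.toNat + 1 := by omega
        rw [hcast1] at hinner
        have hmem_iff : (remaining.getD cs 0 > 0)
            ↔ cs ∈ (g.take dg.toNat).drop (iG.toNat + 1) := by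
          rw [hinv cs]
          constructor
          · intro h; exact List.count_pos_iff.mp (by exact_mod_cast h)
          · intro h; exact_mod_cast List.count_pos_iff.mpr h
        have hne : (cs == cg) = false := by simp [hmatch]
        by_cases hmem : cs ∈ (g.take dg.toNat).drop (iG.toNat + 1)
        · simp only [checkLoop, if_neg hEnd, hgets, hgetg, hne, Bool.false_eq_true,
            if_false, hinner, hmem, decide_true]
          simp only [checkAltLoop, hgets, if_pos hguard, hgetp, hne, Bool.false_eq_true,
            if_false, if_pos (hmem_iff.mpr hmem)]
        · have hrec := ih (iS + 1) iG remaining (by omega) (by omega) h2 h3 (by omega) hinv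
          simp only [checkLoop, if_neg hEnd, hgets, hgetg, hne, Bool.false_eq_true,
            if_false, hinner, hmem, decide_false]
          rw [hrec]
          simp only [checkAltLoop, hgets, if_pos hguard, hgetp, hne, Bool.false_eq_true,
            if_false]
          rw [if_neg (by intro h; exact hmem (hmem_iff.mp h))]

-- B's message loop returns 0 at the first message character when it mismatches the
-- password head but occurs in the frequency dictionary
theorem altLoop_first_hit (pending : List Char) (rem : PySem.Dict Char Int)
    (s : List Char) (a : Int) (rest : List Int) (c p0 : Char)
    (hget : PySem.List.pyGet? s a = some c)
    (hget0 : PySem.List.pyGet? pending 0 = some p0)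
    (hne : (c == p0) = false) (hpos : 0 < rem.getD c 0) :
    checkAltLoop pending rem s 0 (a :: rest) = some 0 := by
  simp [checkAltLoop, hget, hget0, hne, hpos]

theorem check_spec : Claim_equal_check := by
  intro geslo dg sporocilo ds _hdom hpre
  unfold Spec_check check check_alt
  rcases hpre with ⟨h3, h4, hcase⟩ | ⟨hdg1, hgne, hsne, hds1, hhead⟩ | ⟨hgne, hsne, hdsne, hneq, hmem⟩
  · rcases hcase with ⟨h1, h2⟩ | hds0 | ⟨hdg0, hdsg⟩ | ⟨hdgle, hgne, hno⟩
    · -- consistent lengths: the main loop invariant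
      have e1 : PySem.List.slice geslo.toList none (some dg) = geslo.toList.take dg.toNat :=
        PySem.List.slice_to _ (by omega)
      have e3 : PySem.List.slice (geslo.toList.take dg.toNat) (some 1) none
          = (geslo.toList.take dg.toNat).drop 1 := by
        rw [PySem.List.slice_from _ (by omega : (0:Int) ≤ 1)]
        norm_num
      have hmain := checkLoop_eq_alt geslo.toList sporocilo.toList dg ds h1 h2 h4
        (ds.toNat + 1) 0 0
        (((geslo.toList.take dg.toNat).drop 1).foldl
          (fun d c => d.insert c (d.getD c 0 + 1)) PySem.Dict.empty)
        le_rfl (by omega) le_rfl (by omega) (by omega) ?_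
      · rw [hmain]
        simp [e1, e3]
      · intro c
        rw [PySem.Dict.foldl_insert_getD_add_one_eq_counter, PySem.Dict.getD_counter]
        norm_num
    · -- empty message prefix: both sides return 0 immediately
      subst hds0
      rw [PySem.List.pyRange_one_eq_nil le_rfl]
      simp [checkLoop, checkAltLoop]
    · -- empty effective password, message prefix within geslo's length
      have hdgle : dg ≤ 0 := by
        rcases hdg0 with h | h
        · omega
        · have : (0:Int) ≤ geslo.toList.length := by positivity
          omega
      have hpend : PySem.List.slice geslo.toList none (some dg) = ([] : List Char) := by
        by_cases hz : dg = 0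
        · subst hz
          rw [PySem.List.slice_to _ le_rfl]
          simp
        · have hneg : dg < 0 := by omega
          have hlen : geslo.toList.length ≤ (-dg).toNat := by
            rcases hdg0 with h | h
            · omega
            · omega
          rw [show dg = -(((-dg).toNat : Nat) : Int) by omega]
          rw [PySem.List.slice_to_neg_natCast geslo.toList (-dg).toNat (by omega),
            Nat.sub_eq_zero_of_le hlen]
          exact List.take_zero
      have hA := checkLoop_nonpos_dg geslo.toList sporocilo.toList dg ds hdgle hdsg h4
        (ds.toNat + 1) 0 0 le_rfl h3 le_rfl le_rfl (by omega)
      have hB := altLoop_no_head_match sporocilo.toList ds ([] : List Char)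
        ((PySem.List.slice ([] : List Char) (some 1) none).foldl
          (fun d c => d.insert c (d.getD c 0 + 1)) PySem.Dict.empty)
        (by intro c _ hcon; simp at hcon) h4 (ds - 0).toNat 0 le_rfl rfl
      simp [hA, hpend, hB]
    · -- geslo's first character never occurs in the message prefix: both return 0
      obtain ⟨m, hm⟩ := slice_to_take geslo.toList dg
      have hA := checkLoop_head_absent geslo.toList sporocilo.toList dg ds hdgle hgne hno h4
        (ds.toNat + 1) 0 le_rfl h3 (by omega)
      have hhd : ∀ c ∈ sporocilo.toList.take ds.toNat,
          (geslo.toList.take m).head? ≠ some c := by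
        intro c hc hcon
        apply hno
        have hceq : c = geslo.toList.headI := by
          cases hg : geslo.toList with
          | nil => exact absurd hg hgne
          | cons a t =>
            rw [hg] at hcon
            cases m with
            | zero => simp at hcon
            | succ k =>
              simp only [List.take_succ_cons, List.head?_cons, Option.some.injEq] at hcon
              simp [← hcon]
        rwa [← hceq]
      have hB := altLoop_no_head_match sporocilo.toList ds (geslo.toList.take m)
        ((PySem.List.slice (geslo.toList.take m) (some 1) none).foldl
          (fun d c => d.insert c (d.getD c 0 + 1)) PySem.Dict.empty)
        hhd h4 (ds - 0).toNat 0 le_rfl rfl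
      simp [hA, hm, hB]
  · -- dolzina_geslo = 1 and the first characters agree: both return 1 at once
    subst hdg1
    obtain ⟨g0, gt, hg⟩ := List.exists_cons_of_ne_nil hgne
    obtain ⟨s0, st, hs⟩ := List.exists_cons_of_ne_nil hsne
    have hs0g0 : s0 = g0 := by simpa [hg, hs] using hhead
    have hgets : PySem.List.pyGet? sporocilo.toList 0 = some s0 := by
      rw [hs]; exact PySem.List.pyGet?_zero_cons s0 st
    have hgetg : PySem.List.pyGet? geslo.toList 0 = some g0 := by
      rw [hg]; exact PySem.List.pyGet?_zero_cons g0 gt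
    have hA : checkLoop geslo.toList sporocilo.toList 1 ds 0 0 (ds.toNat + 1) = some 1 := by
      have hEnd : ¬ (0 : Int) = ds := by omega
      simp [checkLoop, hEnd, hgets, hgetg, hs0g0]
    have hpend : PySem.List.slice geslo.toList none (some 1) = [g0] := by
      rw [PySem.List.slice_to _ (by omega : (0:Int) ≤ 1), hg]
      norm_num
    have hrange : PySem.List.pyRange 0 ds 1 = 0 :: PySem.List.pyRange 1 ds 1 := by
      rw [PySem.List.pyRange_one_cons (by omega)]
      norm_num
    have hB : checkAltLoop [g0]
        ((PySem.List.slice [g0] (some 1) none).foldl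
          (fun d c => d.insert c (d.getD c 0 + 1)) PySem.Dict.empty)
        sporocilo.toList 0 (PySem.List.pyRange 0 ds 1) = some 1 := by
      rw [hrange]
      simp [checkAltLoop, hgets, hs0g0]
    simp [hA, hpend, hB]
  · -- first message character mismatches and occurs later in the password prefix:
    -- A's inner scan and B's frequency lookup both fail the password at once
    obtain ⟨g0, gt, hg⟩ := List.exists_cons_of_ne_nil hgne
    obtain ⟨s0, st, hs⟩ := List.exists_cons_of_ne_nil hsne
    have hs0 : sporocilo.toList.headI = s0 := by rw [hs]; rfl
    have hg0 : geslo.toList.headI = g0 := by rw [hg]; rfl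
    rw [hs0] at hneq hmem
    rw [hg0] at hneq
    have hdg2 : 2 ≤ dg.toNat ∧ 2 ≤ geslo.toList.length := by
      by_contra hcon
      have hnil : (geslo.toList.take dg.toNat).drop 1 = [] := by
        apply List.drop_eq_nil_of_le
        rw [List.length_take]
        omega
      rw [hnil] at hmem
      cases hmem
    obtain ⟨hdga, hdgb⟩ := hdg2
    have hdgpos : (0:Int) ≤ dg := by omega
    have hgets : PySem.List.pyGet? sporocilo.toList 0 = some s0 := by
      rw [hs]; exact PySem.List.pyGet?_zero_cons s0 st
    have hgetg : PySem.List.pyGet? geslo.toList 0 = some g0 := by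
      rw [hg]; exact PySem.List.pyGet?_zero_cons g0 gt
    have hne : (s0 == g0) = false := by simp [hneq]
    have hinner : checkInner geslo.toList s0 (PySem.List.pyRange 1 dg 1) = some true := by
      refine checkInner_finds geslo.toList s0 dg (dg - 1).toNat 1 (by omega) rfl ?_
      simpa using hmem
    have e1 : PySem.List.slice geslo.toList none (some dg) = geslo.toList.take dg.toNat :=
      PySem.List.slice_to _ hdgpos
    have e3 : PySem.List.slice (geslo.toList.take dg.toNat) (some 1) none
        = (geslo.toList.take dg.toNat).drop 1 := by
      rw [PySem.List.slice_from _ (by omega : (0:Int) ≤ 1)]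
      norm_num
    have hpos : (0:Int) < (((geslo.toList.take dg.toNat).drop 1).foldl
        (fun d c => d.insert c (d.getD c 0 + 1)) PySem.Dict.empty).getD s0 0 := by
      rw [PySem.Dict.foldl_insert_getD_add_one_eq_counter, PySem.Dict.getD_counter]
      exact_mod_cast List.count_pos_iff.mpr hmem
    by_cases hds : 0 < ds
    · have hEnd : ¬ (0 : Int) = ds := by omega
      have hA : checkLoop geslo.toList sporocilo.toList dg ds 0 0 (ds.toNat + 1) = some 0 := by
        simp [checkLoop, hEnd, hgets, hgetg, hne, hinner]
      obtain ⟨k, hk⟩ : ∃ k, dg.toNat = k + 1 := ⟨dg.toNat - 1, by omega⟩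
      have hpend : geslo.toList.take dg.toNat = g0 :: gt.take k := by
        rw [hg, hk, List.take_succ_cons]
      have hrange : PySem.List.pyRange 0 ds 1 = 0 :: PySem.List.pyRange 1 ds 1 :=
        PySem.List.pyRange_one_cons (by omega)
      have hB : checkAltLoop (geslo.toList.take dg.toNat)
          (((geslo.toList.take dg.toNat).drop 1).foldl
            (fun d c => d.insert c (d.getD c 0 + 1)) PySem.Dict.empty)
          sporocilo.toList 0 (PySem.List.pyRange 0 ds 1) = some 0 := by
        rw [hrange]
        refine altLoop_first_hit _ _ _ _ _ _ g0 hgets ?_ hne hpos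
        rw [hpend]
        exact PySem.List.pyGet?_zero_cons g0 (gt.take k)
      rw [hA]
      simp only [Option.getD_some, e1, e3, hB]
    · -- a negative declared message length: both loops do nothing and return 0
      have hneg : ds < 0 := by omega
      have hEnd : ¬ (0 : Int) = ds := by omega
      have hA : checkLoop geslo.toList sporocilo.toList dg ds 0 0 (ds.toNat + 1) = some 0 := by
        simp [checkLoop, hEnd, hgets, hgetg, hne, hinner]
      have hrange : PySem.List.pyRange 0 ds 1 = [] :=
        PySem.List.pyRange_one_eq_nil (by omega)
      rw [hA]
      simp only [Option.getD_some, e1, e3, hrange]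
      rfl
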